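-- pv_equiv track=rewrite | github.com/EvoClaw-Bench/EvoClaw | harness/utils/rust_test_filter.py | _expand_range_to_include_doc_comments
-- ===== SOURCE A (Python) =====
-- from typing import Dict, List, Optional, Tuple
--
-- def _is_doc_comment_or_empty(line: str) -> bool:
--     """Check if a line is a doc comment or empty/whitespace."""
--     stripped = line.strip()
--     if not stripped:
--         return True
--     return stripped.startswith("///") or stripped.startswith("//!")
--
-- def _expand_range_to_include_doc_comments(lines: List[str], start: int, end: int) -> Tuple[int, int]:
--     """
--     Expand a range to include preceding doc comments.
--
--     When removing a test function like:
--         /// Some doc comment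
--         #[cfg(test)]
--         fn test_foo() { ... }
--
--     We need to also remove the doc comment, otherwise it becomes a dangling
--     comment that causes compilation errors.
--
--     Args:
--         lines: All file lines (0-indexed)
--         start: Start line (1-indexed)
--         end: End line (1-indexed)
--
--     Returns:
--         Expanded (start, end) tuple (1-indexed)
--     """
--     start_idx = start - 1  # Convert to 0-indexed
--
--     # Scan backwards from start to find doc comments
--     while start_idx > 0:
--         prev_line = lines[start_idx - 1]
--         if _is_doc_comment_or_empty(prev_line):
--             start_idx -= 1
--         else:
--             break
--
--     # Skip any leading empty lines we picked up (keep them in the file)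
--     while start_idx < start - 1 and not lines[start_idx].strip():
--         start_idx += 1
--
--     return (start_idx + 1, end)  # Convert back to 1-indexed
-- ===== SOURCE B (Python) =====
-- def _expand_range_to_include_doc_comments(lines, start, end):
--     """Single backward pass: track the earliest non-empty doc-comment line
--     reachable from start through doc-comment/empty lines only."""
--     result = start - 1  # 0-indexed
--     for i in range(start - 2, -1, -1):
--         stripped = lines[i].strip()
--         if not stripped:
--             continue
--         if stripped.startswith("///") or stripped.startswith("//!"):
--             result = i
--         else:
--             break
--     return (result + 1, end)
-- ===== Notes on version B (the rewrite author's own statement) =====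
-- stated objective: simpler
-- what changed: Replaces A's two-phase scan (backward while-loop collecting doc/empty lines, then forward while-loop skipping the empties picked up) with a single backward pass that tracks the earliest non-empty doc-comment line as an accumulator.
import Mathlib
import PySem

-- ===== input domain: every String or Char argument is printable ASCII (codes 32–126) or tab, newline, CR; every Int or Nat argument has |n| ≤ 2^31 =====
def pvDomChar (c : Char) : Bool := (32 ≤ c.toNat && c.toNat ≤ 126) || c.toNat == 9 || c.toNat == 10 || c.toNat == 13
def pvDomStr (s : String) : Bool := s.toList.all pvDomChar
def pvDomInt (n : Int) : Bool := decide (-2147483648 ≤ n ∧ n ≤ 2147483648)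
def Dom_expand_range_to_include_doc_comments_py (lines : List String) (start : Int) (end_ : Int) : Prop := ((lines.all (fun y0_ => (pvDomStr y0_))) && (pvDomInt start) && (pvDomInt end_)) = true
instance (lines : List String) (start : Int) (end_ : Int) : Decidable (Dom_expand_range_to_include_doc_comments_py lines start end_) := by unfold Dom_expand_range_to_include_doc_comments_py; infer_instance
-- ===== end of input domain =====

-- B folds A's two scans (backward collect of doc/empty lines, then forward skip of
-- leading empties) into ONE backward pass that tracks the earliest non-empty
-- doc-comment line; objective: simpler.

-- ===== PORT A =====
-- _is_doc_comment_or_empty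
def pvIsDocCommentOrEmpty (line : String) : Bool :=
  let stripped := PySem.Str.strip line
  if stripped = "" then true
  else PySem.Str.startswith stripped "///" || PySem.Str.startswith stripped "//!"

-- first while loop: scan backwards while the previous line is a doc comment or empty.
-- lines[start_idx-1] is total here via getD ""; Pre_ excludes the inputs where
-- Python's indexing would raise (start > len(lines)+1), so the default is never read.
def pvLoopBack (lines : List String) (i : Int) : Int :=
  if _h : 0 < i then
    let prev := (PySem.List.pyGet? lines (i - 1)).getD ""
    if pvIsDocCommentOrEmpty prev then pvLoopBack lines (i - 1) else i
  else i
termination_by i.toNat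
decreasing_by all_goals omega

-- second while loop: skip leading empty lines picked up by the first loop
def pvLoopFwd (lines : List String) (start : Int) (i : Int) : Int :=
  if _h : i < start - 1 then
    if PySem.Str.strip ((PySem.List.pyGet? lines i).getD "") = "" then
      pvLoopFwd lines start (i + 1)
    else i
  else i
termination_by (start - 1 - i).toNat
decreasing_by all_goals omega

def expand_range_to_include_doc_comments_py (lines : List String) (start : Int) (end_ : Int) : Int × Int :=
  (pvLoopFwd lines start (pvLoopBack lines (start - 1)) + 1, end_)

-- ===== PORT B =====
-- single backward pass: result tracks the earliest non-empty doc-comment line seen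
def pvScanBack (lines : List String) (i : Int) (result : Int) : Int :=
  if _h : 0 ≤ i then
    let stripped := PySem.Str.strip ((PySem.List.pyGet? lines i).getD "")
    if stripped = "" then pvScanBack lines (i - 1) result
    else if PySem.Str.startswith stripped "///" || PySem.Str.startswith stripped "//!" then
      pvScanBack lines (i - 1) i
    else result
  else result
termination_by (i + 1).toNat
decreasing_by all_goals omega

def expand_range_to_include_doc_comments_py_alt (lines : List String) (start : Int) (end_ : Int) : Int × Int :=
  (pvScanBack lines (start - 2) (start - 1) + 1, end_)

-- ===== PRECONDITION & SPEC =====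
-- Pre_ excludes exactly the inputs where Python A raises IndexError
-- (start ≥ len(lines)+2, where lines[start-2] is read out of range).
def Pre_expand_range_to_include_doc_comments_py (lines : List String) (start : Int) (end_ : Int) : Prop :=
  start ≤ (lines.length : Int) + 1
instance (lines : List String) (start : Int) (end_ : Int) : Decidable (Pre_expand_range_to_include_doc_comments_py lines start end_) := by unfold Pre_expand_range_to_include_doc_comments_py; infer_instance

def pvWitness_expand_range_to_include_doc_comments_py : List String × Int × Int :=
  (["/// doc", "fn test_foo() {}"], 2, 2)

def Spec_expand_range_to_include_doc_comments_py (lines : List String) (start : Int) (end_ : Int) (out : Int × Int) : Prop := out = expand_range_to_include_doc_comments_py_alt lines start end_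
instance (lines : List String) (start : Int) (end_ : Int) (out : Int × Int) : Decidable (Spec_expand_range_to_include_doc_comments_py lines start end_ out) := by unfold Spec_expand_range_to_include_doc_comments_py; infer_instance

-- ===== CLAIM (what is proved, stated in full; the proofs are below) =====
def Claim_equal_expand_range_to_include_doc_comments_py : Prop := ∀ (lines : List String) (start : Int) (end_ : Int), Dom_expand_range_to_include_doc_comments_py lines start end_ → Pre_expand_range_to_include_doc_comments_py lines start end_ → Spec_expand_range_to_include_doc_comments_py lines start end_ (expand_range_to_include_doc_comments_py lines start end_)

-- ===== LEMMAS AND PROOFS =====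

-- The accumulator of B's single pass at position i-1 is A's forward-skip result from i;
-- so B's scan from i-1 equals A's forward skip applied to A's backward scan from i.
lemma pvScan_eq (lines : List String) (start : Int) :
    ∀ (k : Nat) (i : Int), i.toNat = k → 0 ≤ i → i ≤ start - 1 →
      pvScanBack lines (i - 1) (pvLoopFwd lines start i)
        = pvLoopFwd lines start (pvLoopBack lines i) := by
  intro k
  induction k with
  | zero =>
    intro i hk h0 _
    have hi : i = 0 := by omega
    subst hi
    rw [pvLoopBack]
    simp [pvScanBack]
  | succ k ih =>
    intro i hk h0 hle
    have hipos : 0 < i := by omega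
    have h01 : (0:Int) ≤ i - 1 := by omega
    rw [pvLoopBack, dif_pos hipos]
    set s := PySem.Str.strip ((PySem.List.pyGet? lines (i - 1)).getD "") with hs
    by_cases hemp : s = ""
    · -- previous line empty: both recurse, accumulator unchanged
      have hdoc : pvIsDocCommentOrEmpty ((PySem.List.pyGet? lines (i - 1)).getD "") = true := by
        simp only [pvIsDocCommentOrEmpty, ← hs]
        rw [if_pos hemp]
      simp only [hdoc, if_true]
      have hfwd : pvLoopFwd lines start i = pvLoopFwd lines start (i - 1) := by
        conv_rhs => rw [pvLoopFwd]
        rw [dif_pos (show i - 1 < start - 1 by omega)]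
        simp only [← hs]
        rw [if_pos hemp, show i - 1 + 1 = i by ring]
      rw [pvScanBack, dif_pos h01]
      simp only [← hs]
      rw [if_pos hemp, hfwd]
      exact ih (i - 1) (by omega) (by omega) (by omega)
    · by_cases hpre : (PySem.Str.startswith s "///" || PySem.Str.startswith s "//!") = true
      · -- previous line a non-empty doc comment: both recurse, accumulator becomes i-1
        have hdoc : pvIsDocCommentOrEmpty ((PySem.List.pyGet? lines (i - 1)).getD "") = true := by
          simp only [pvIsDocCommentOrEmpty, ← hs]
          rw [if_neg hemp]
          exact hpre
        simp only [hdoc, if_true]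
        have hfwd : pvLoopFwd lines start (i - 1) = i - 1 := by
          rw [pvLoopFwd]
          by_cases h1 : i - 1 < start - 1
          · rw [dif_pos h1]
            simp only [← hs]
            rw [if_neg hemp]
          · rw [dif_neg h1]
        rw [pvScanBack, dif_pos h01]
        simp only [← hs]
        rw [if_neg hemp, hpre, if_pos rfl]
        have hI := ih (i - 1) (by omega) (by omega) (by omega)
        rw [hfwd] at hI
        exact hI
      · -- previous line ordinary code: both stop
        have hpre' : (PySem.Str.startswith s "///" || PySem.Str.startswith s "//!") = false := by
          revert hpre
          cases PySem.Str.startswith s "///" || PySem.Str.startswith s "//!" <;> simp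
        have hdoc : pvIsDocCommentOrEmpty ((PySem.List.pyGet? lines (i - 1)).getD "") = false := by
          simp only [pvIsDocCommentOrEmpty, ← hs]
          rw [if_neg hemp]
          exact hpre'
        simp only [hdoc, Bool.false_eq_true, if_false]
        rw [pvScanBack, dif_pos h01]
        simp only [← hs]
        rw [if_neg hemp, hpre']
        simp

-- ===== VERDICT (by name: the statement is the Claim_ definition above) =====
theorem expand_range_to_include_doc_comments_py_spec : Claim_equal_expand_range_to_include_doc_comments_py := by
  intro lines start end_ _hdom _hpre
  unfold Spec_expand_range_to_include_doc_comments_py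
  unfold expand_range_to_include_doc_comments_py expand_range_to_include_doc_comments_py_alt
  by_cases h0 : 0 ≤ start - 1
  · have hinit : pvLoopFwd lines start (start - 1) = start - 1 := by
      rw [pvLoopFwd]; simp
    have hL := pvScan_eq lines start (start - 1).toNat (start - 1) rfl h0 (le_refl _)
    rw [hinit] at hL
    rw [← hL, show start - 2 = start - 1 - 1 by ring]
  · -- start ≤ 0: all loops return immediately
    rw [pvLoopBack, pvScanBack, pvLoopFwd]
    simp only [show ¬ (0 < start - 1) by omega, dif_neg, not_false_iff,
               show ¬ (0 ≤ start - 2) by omega, show ¬ (start - 1 < start - 1) by omega]
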